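-- pv_equiv track=rewrite | github.com/rum1r/babanuki | main.py | initial_putdown
-- ===== SOURCE A (Python) =====
-- from typing import List, Dict, Union
--
-- def initial_putdown(deck: List[str]) -> List[str]:
--     """揃ったカードを捨てるよ！"""
--     while len(set(deck)) != len(deck):
--         popped_card = deck.pop(0)
--         if popped_card in deck:
--             deck.remove(popped_card)
--         else:
--             deck.append(popped_card)
--     return deck
-- ===== SOURCE B (Python) =====
-- from typing import List
-- from collections import deque, Counter
--
-- def initial_putdown(deck: List[str]) -> List[str]:
--     """揃ったカードを捨てるよ！ (one-pass queue simulation with a Counter and lazy partner deletion)"""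
--     dq = deque(deck)
--     cnt = Counter(deck)
--     dup_kinds = len([v for v in cnt.values() if v >= 2])
--     pending = Counter()
--     while dup_kinds:
--         card = dq.popleft()
--         if pending[card]:
--             pending[card] -= 1
--         elif cnt[card] >= 2:
--             cnt[card] -= 2
--             if cnt[card] < 2:
--                 dup_kinds -= 1
--             pending[card] += 1
--         else:
--             dq.append(card)
--     out = []
--     for card in dq:
--         if pending[card]:
--             pending[card] -= 1
--         else:
--             out.append(card)
--     deck[:] = out
--     return deck
-- ===== Notes on version B (the rewrite author's own statement) =====
-- stated objective: faster
-- what changed: Replaces A's quadratic pop(0)/membership-scan/remove rotation of the list by a single-pass deque simulation that keeps a Counter of remaining cards, an incrementally maintained count of duplicated kinds, and lazily deletes the partner of each discarded pair.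
import Mathlib
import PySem

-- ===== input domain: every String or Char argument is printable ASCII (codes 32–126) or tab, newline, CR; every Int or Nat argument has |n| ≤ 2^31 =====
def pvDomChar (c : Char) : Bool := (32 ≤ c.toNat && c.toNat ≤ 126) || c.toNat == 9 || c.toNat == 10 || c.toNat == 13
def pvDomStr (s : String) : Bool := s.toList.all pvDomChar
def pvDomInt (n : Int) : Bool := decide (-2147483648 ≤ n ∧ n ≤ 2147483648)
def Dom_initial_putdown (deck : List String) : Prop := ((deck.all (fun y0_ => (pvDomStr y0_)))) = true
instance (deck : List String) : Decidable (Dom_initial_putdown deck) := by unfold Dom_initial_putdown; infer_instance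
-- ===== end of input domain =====

-- B replaces A's quadratic pop/remove/append rotation by a one-pass queue simulation with a
-- Counter and lazy partner deletion (objective: faster). Both A and B mutate `deck` in place to
-- the same final content; the theorems below are about the returned value.

-- ===== PORT A =====
-- index of the first card that still has a pair partner in the deck (termination measure helper)
def firstDup (deck : List String) : Nat :=
  deck.findIdx (fun y => 2 ≤ deck.count y)

-- len(set(l)) == len(l) iff l has no duplicates (justifies A's loop guard and termination)
theorem setLen_eq_iff_nodup (l : List String) :
    (PySem.Set.ofList l).length = l.length ↔ l.Nodup := by
  have h1 : (PySem.Set.ofList l).toFinset = l.toFinset := by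
    ext y; simp [List.mem_toFinset, PySem.Set.mem_ofList]
  have h2 : (PySem.Set.ofList l).toFinset.card = (PySem.Set.ofList l).length :=
    List.toFinset_card_of_nodup (PySem.Set.nodup_ofList l)
  have h3 : (PySem.Set.ofList l).length = l.toFinset.card := by rw [← h2, h1]
  rw [h3]
  constructor
  · intro h
    have := Multiset.toFinset_card_eq_card_iff_nodup (m := (l : Multiset String))
    simpa using this.mp (by simpa using h)
  · intro h
    exact List.toFinset_card_of_nodup h

-- the measure decreases when a pair is discarded
theorem firstDup_remove_lt (x : String) (rest : List String) (hx : x ∈ rest) :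
    (rest.erase x).length * (rest.erase x).length + firstDup (rest.erase x)
      < (x :: rest).length * (x :: rest).length + firstDup (x :: rest) := by
  have h1 : (rest.erase x).length = rest.length - 1 := List.length_erase_of_mem hx
  have h2 : 1 ≤ rest.length := List.length_pos_iff.mpr (List.ne_nil_of_mem hx)
  have h3 : firstDup (rest.erase x) ≤ (rest.erase x).length := List.findIdx_le_length
  obtain ⟨m, hm⟩ : ∃ m, rest.length = m + 1 := ⟨rest.length - 1, by omega⟩
  have h4 : (rest.erase x).length = m := by omega
  simp only [List.length_cons, h4, hm]
  nlinarith [h3, h4]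

-- the measure decreases when the front card is rotated to the back
theorem firstDup_rotate_lt (x : String) (rest : List String) (hx : x ∉ rest)
    (h : (PySem.Set.ofList (x :: rest)).length ≠ (x :: rest).length) :
    (rest ++ [x]).length * (rest ++ [x]).length + firstDup (rest ++ [x])
      < (x :: rest).length * (x :: rest).length + firstDup (x :: rest) := by
  have hperm : (rest ++ [x]).Perm (x :: rest) := List.perm_append_singleton x rest
  have hcnt : ∀ y, (rest ++ [x]).count y = (x :: rest).count y := fun y => hperm.count_eq y
  have hpred : (fun y => decide (2 ≤ (rest ++ [x]).count y))
      = (fun y => decide (2 ≤ (x :: rest).count y)) := by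
    funext y; rw [hcnt y]
  have hnd : ¬ (x :: rest).Nodup := fun hn => h ((setLen_eq_iff_nodup _).mpr hn)
  have hex : ∃ y, 2 ≤ (x :: rest).count y := by
    by_contra hc
    push_neg at hc
    exact hnd (List.nodup_iff_count_le_one.mpr (fun a => by have := hc a; omega))
  obtain ⟨y, hy⟩ := hex
  have hyx : y ≠ x := by
    intro he; subst he
    have : (y :: rest).count y = 1 := by
      simp [List.count_cons_self, List.count_eq_zero.mpr hx]
    omega
  have hymem : y ∈ rest := by
    have : y ∈ x :: rest := List.count_pos_iff.mp (by omega)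
    rcases this with _ | hmem
    · exact absurd rfl hyx
    · assumption
  have hfr : List.findIdx (fun z => decide (2 ≤ (x :: rest).count z)) rest < rest.length :=
    List.findIdx_lt_length.mpr ⟨y, hymem, by simpa using hy⟩
  have hpx : (decide (2 ≤ (x :: rest).count x)) = false := by
    have : (x :: rest).count x = 1 := by
      simp [List.count_cons_self, List.count_eq_zero.mpr hx]
    simp [this]
  have e1 : firstDup (rest ++ [x]) = List.findIdx (fun z => decide (2 ≤ (x :: rest).count z)) rest := by
    unfold firstDup
    rw [hpred, List.findIdx_append, if_pos hfr]
  have e2 : firstDup (x :: rest) = List.findIdx (fun z => decide (2 ≤ (x :: rest).count z)) rest + 1 := by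
    unfold firstDup
    rw [List.findIdx_cons, hpx]
    rfl
  have hl : (rest ++ [x]).length = (x :: rest).length := by simp
  rw [e1, e2, hl]
  omega

-- literal port of A: while len(set(deck)) != len(deck): pop(0); remove first duplicate or append
def initial_putdown (deck : List String) : List String :=
  if h : (PySem.Set.ofList deck).length ≠ deck.length then
    match deck, h with
    | [], h => absurd rfl h            -- unreachable: len(set([])) == len([])
    | x :: rest, h =>
      if hx : x ∈ rest then
        initial_putdown ((PySem.List.remove? rest x).getD rest)   -- deck.remove(popped_card)
      else
        initial_putdown (rest ++ [x])                             -- deck.append(popped_card)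
  else deck
termination_by deck.length * deck.length + firstDup deck
decreasing_by
  · rw [PySem.List.remove?_eq_some_erase rest x hx, Option.getD_some]
    exact firstDup_remove_lt x rest hx
  · exact firstDup_rotate_lt x rest hx h

-- ===== PORT B =====
-- final pass of Source B: collect the queue, skipping the lazily deleted occurrences
def bFinal (dq : List String) (pend : PySem.Dict String Int) : List String :=
  (dq.foldl (fun (s : List String × PySem.Dict String Int) card =>
      if s.2.getD card 0 ≠ 0 then (s.1, s.2.modify card 0 (· - 1))
      else (s.1 ++ [card], s.2)) ([], pend)).1

-- Source B's while loop, on state (queue, counter, dup_kinds, pending); fuel is a totality guard only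
def bLoop : Nat → List String → PySem.Dict String Int → Int → PySem.Dict String Int → List String
  | 0, dq, _, _, pend => bFinal dq pend
  | fuel + 1, dq, cnt, dk, pend =>
    if dk ≠ 0 then
      match dq with
      | [] => bFinal [] pend           -- unreachable (popleft of an empty deque)
      | card :: dq' =>
        if pend.getD card 0 ≠ 0 then
          bLoop fuel dq' cnt dk (pend.modify card 0 (· - 1))
        else if 2 ≤ cnt.getD card 0 then
          let cnt' := cnt.modify card 0 (· - 2)
          bLoop fuel dq' cnt' (if cnt'.getD card 0 < 2 then dk - 1 else dk)
            (pend.modify card 0 (· + 1))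
        else
          bLoop fuel (dq' ++ [card]) cnt dk pend
    else bFinal dq pend

-- literal port of Source B
def initial_putdown_alt (deck : List String) : List String :=
  let cnt := PySem.Dict.counter deck
  let dk : Int := ((cnt.values.filter (fun v => decide (2 ≤ v))).length : Int)
  bLoop (2 * deck.length * deck.length + 2 * deck.length + 1) deck cnt dk PySem.Dict.empty

-- ===== PRECONDITION & SPEC =====
def Spec_initial_putdown (deck : List String) (out : List String) : Prop := out = initial_putdown_alt deck
instance (deck : List String) (out : List String) : Decidable (Spec_initial_putdown deck out) := by unfold Spec_initial_putdown; infer_instance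

-- ===== CLAIM (what is proved, stated in full; the proofs are below) =====
def Claim_equal_initial_putdown : Prop := ∀ (deck : List String), Dom_initial_putdown deck → Spec_initial_putdown deck (initial_putdown deck)

-- ===== LEMMAS AND PROOFS =====

-- the pending Counter viewed as a function
def pf (pend : PySem.Dict String Int) : String → Int := fun x => pend.getD x 0

-- pointwise decrement / increment at one card
def dec1 (p : String → Int) (x : String) : String → Int := fun y => if y = x then p x - 1 else p y
def bump (p : String → Int) (x : String) : String → Int := fun y => if y = x then p x + 1 else p y

-- remove, for every card, the first p(card) occurrences from the queue (the real deck)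
def rp : List String → (String → Int) → List String
  | [], _ => []
  | x :: xs, p => if p x ≠ 0 then rp xs (dec1 p x) else x :: rp xs p

-- number of card kinds that still have a pair partner
def dks (deck : List String) : Nat := (deck.toFinset.filter (fun y => 2 ≤ deck.count y)).card

-- A's termination measure
def muA (deck : List String) : Nat := deck.length * deck.length + firstDup deck

theorem rp_skip (x : String) (xs : List String) (p : String → Int) (h : p x ≠ 0) :
    rp (x :: xs) p = rp xs (dec1 p x) := by
  simp only [rp, if_pos h]

theorem rp_keep (x : String) (xs : List String) (p : String → Int) (h : p x = 0) :
    rp (x :: xs) p = x :: rp xs p := by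
  simp only [rp]
  rw [if_neg (by simp [h])]

theorem rp_zero (xs : List String) (p : String → Int) (hp : ∀ y, p y = 0) : rp xs p = xs := by
  induction xs generalizing p with
  | nil => rfl
  | cons x t ih => rw [rp_keep x t p (hp x), ih p hp]

theorem rp_length_le (xs : List String) (p : String → Int) : (rp xs p).length ≤ xs.length := by
  induction xs generalizing p with
  | nil => simp [rp]
  | cons x t ih =>
    by_cases h : p x ≠ 0
    · rw [rp_skip x t p h]
      exact Nat.le_succ_of_le (ih _)
    · rw [ne_eq, not_not] at h
      rw [rp_keep x t p h, List.length_cons]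
      exact Nat.succ_le_succ (ih _)

theorem dec1_bump_self (p : String → Int) (x : String) : dec1 (bump p x) x = p := by
  funext y
  by_cases hy : y = x <;> simp [dec1, bump, hy]

theorem bump_dec1_self (p : String → Int) (x : String) : bump (dec1 p x) x = p := by
  funext y
  by_cases hy : y = x <;> simp [dec1, bump, hy]

theorem dec1_bump_comm (p : String → Int) (x z : String) (hzx : z ≠ x) :
    dec1 (bump p x) z = bump (dec1 p z) x := by
  funext y
  by_cases hy : y = z
  · subst hy; simp [dec1, bump, hzx, Ne.symm hzx]
  · by_cases hy2 : y = x
    · subst hy2; simp [dec1, bump, hzx, Ne.symm hzx, hy]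
    · simp [dec1, bump, hy, hy2]

theorem bump_apply_self (p : String → Int) (x : String) : bump p x x = p x + 1 := by
  simp [bump]

theorem bump_apply_of_ne (p : String → Int) (x y : String) (h : y ≠ x) : bump p x y = p y := by
  simp [bump, h]

theorem dec1_nonneg (p : String → Int) (z : String) (hnn : ∀ y, 0 ≤ p y) (hz : p z ≠ 0) :
    ∀ y, 0 ≤ dec1 p z y := by
  intro y
  simp only [dec1]
  split_ifs with hy
  · have := hnn z; omega
  · exact hnn y

-- bumping the pending count of a kept card erases its first kept occurrence
theorem rp_bump (xs : List String) (p : String → Int) (x : String)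
    (hnn : ∀ y, 0 ≤ p y) (hmem : x ∈ rp xs p) :
    rp xs (bump p x) = (rp xs p).erase x := by
  induction xs generalizing p with
  | nil => simp [rp] at hmem
  | cons z t ih =>
    by_cases hz : p z ≠ 0
    · have hmem' : x ∈ rp t (dec1 p z) := by rwa [rp_skip z t p hz] at hmem
      have hq : ∀ y, 0 ≤ dec1 p z y := dec1_nonneg p z hnn hz
      rw [rp_skip z t p hz]
      by_cases hzx : z = x
      · subst hzx
        have h1 : bump p z z ≠ 0 := by rw [bump_apply_self]; have := hnn z; omega
        have hih := ih (dec1 p z) hq hmem'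
        rw [bump_dec1_self p z] at hih
        rw [rp_skip z t (bump p z) h1, dec1_bump_self]
        exact hih
      · have h1 : bump p x z ≠ 0 := by rwa [bump_apply_of_ne p x z hzx]
        rw [rp_skip z t (bump p x) h1, dec1_bump_comm p x z hzx]
        exact ih (dec1 p z) hq hmem'
    · rw [ne_eq, not_not] at hz
      by_cases hzx : z = x
      · subst hzx
        have h1 : bump p z z ≠ 0 := by rw [bump_apply_self, hz]; omega
        rw [rp_skip z t (bump p z) h1, dec1_bump_self]
        rw [rp_keep z t p hz, List.erase_cons_head]
      · have h1 : bump p x z = 0 := by rwa [bump_apply_of_ne p x z hzx]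
        rw [rp_keep z t (bump p x) h1, rp_keep z t p hz]
        have hmem' : x ∈ rp t p := by
          rw [rp_keep z t p hz] at hmem
          rcases List.mem_cons.mp hmem with h | h
          · exact absurd h.symm hzx
          · exact h
        rw [ih p hnn hmem']
        rw [List.erase_cons_tail (by simp [hzx])]

-- a card with no pending deletions stays at the back
theorem rp_append (xs : List String) (p : String → Int) (x : String) (hpx : p x = 0) :
    rp (xs ++ [x]) p = rp xs p ++ [x] := by
  induction xs generalizing p with
  | nil => simp [rp_keep x [] p hpx, rp]
  | cons z t ih =>
    by_cases hz : p z ≠ 0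
    · have hzx : z ≠ x := fun h => hz (h ▸ hpx)
      rw [List.cons_append, rp_skip z (t ++ [x]) p hz, rp_skip z t p hz]
      exact ih (dec1 p z) (by simp only [dec1, if_neg (Ne.symm hzx)]; exact hpx)
    · rw [ne_eq, not_not] at hz
      rw [List.cons_append, rp_keep z (t ++ [x]) p hz, rp_keep z t p hz, ih p hpx,
        List.cons_append]

theorem pf_modify_sub (pend : PySem.Dict String Int) (c : String) :
    pf (pend.modify c 0 (· - 1)) = dec1 (pf pend) c := by
  funext y
  simp [pf, dec1, PySem.Dict.getD_modify]

theorem pf_modify_add (pend : PySem.Dict String Int) (c : String) :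
    pf (pend.modify c 0 (· + 1)) = bump (pf pend) c := by
  funext y
  simp [pf, bump, PySem.Dict.getD_modify]

theorem bFinal_aux (dq : List String) (pend : PySem.Dict String Int) (acc : List String) :
    (dq.foldl (fun (s : List String × PySem.Dict String Int) card =>
        if s.2.getD card 0 ≠ 0 then (s.1, s.2.modify card 0 (· - 1))
        else (s.1 ++ [card], s.2)) (acc, pend)).1 = acc ++ rp dq (pf pend) := by
  induction dq generalizing pend acc with
  | nil => simp [rp]
  | cons c t ih =>
    by_cases h : pend.getD c 0 ≠ 0
    · rw [List.foldl_cons]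
      simp only [if_pos h]
      rw [ih, rp_skip c t (pf pend) h, pf_modify_sub]
    · rw [ne_eq, not_not] at h
      rw [List.foldl_cons]
      simp only [h, ne_eq, not_true_eq_false, if_false, reduceIte]
      rw [ih, rp_keep c t (pf pend) h, List.append_assoc, List.singleton_append]

theorem bFinal_eq_rp (dq : List String) (pend : PySem.Dict String Int) :
    bFinal dq pend = rp dq (pf pend) := by
  unfold bFinal
  simpa using bFinal_aux dq pend []

theorem mem_dksFilter (d : List String) (y : String) :
    y ∈ d.toFinset.filter (fun z => 2 ≤ d.count z) ↔ 2 ≤ d.count y := by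
  rw [Finset.mem_filter, List.mem_toFinset]
  constructor
  · exact fun h => h.2
  · intro h
    exact ⟨List.count_pos_iff.mp (by omega), h⟩

theorem dks_eq_zero_iff (deck : List String) : dks deck = 0 ↔ deck.Nodup := by
  unfold dks
  rw [Finset.card_eq_zero, Finset.eq_empty_iff_forall_notMem]
  constructor
  · intro h
    rw [List.nodup_iff_count_le_one]
    intro a
    by_cases ha : 2 ≤ deck.count a
    · exact absurd ((mem_dksFilter deck a).mpr ha) (h a)
    · omega
  · intro h y hy
    have h1 := (mem_dksFilter deck y).mp hy
    have h2 := List.nodup_iff_count_le_one.mp h y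
    omega

theorem dks_perm (d₁ d₂ : List String) (h : d₁.Perm d₂) : dks d₁ = dks d₂ := by
  unfold dks
  have h1 : ∀ y, d₁.count y = d₂.count y := fun y => h.count_eq y
  have : d₁.toFinset.filter (fun y => 2 ≤ d₁.count y)
      = d₂.toFinset.filter (fun y => 2 ≤ d₂.count y) := by
    ext y
    rw [mem_dksFilter, mem_dksFilter, h1 y]
  rw [this]

theorem dks_remove (x : String) (rest : List String) (hx : x ∈ rest) :
    dks (rest.erase x)
      = if (x :: rest).count x - 2 < 2 then dks (x :: rest) - 1 else dks (x :: rest) := by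
  have hcx : 1 ≤ rest.count x := List.count_pos_iff.mpr hx
  have hcnt : ∀ y, (rest.erase x).count y
      = if y = x then rest.count x - 1 else rest.count y := by
    intro y
    by_cases hy : y = x
    · subst hy; simp [List.count_erase_self]
    · simp [hy, List.count_erase_of_ne hy]
  have hcons : ∀ y, (x :: rest).count y
      = if y = x then rest.count x + 1 else rest.count y := by
    intro y
    by_cases hy : y = x
    · subst hy; simp [List.count_cons_self]
    · rw [if_neg hy]; simp [List.count_cons, Ne.symm hy]
  have hxS : x ∈ (x :: rest).toFinset.filter (fun z => 2 ≤ (x :: rest).count z) := by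
    rw [mem_dksFilter, hcons x, if_pos rfl]; omega
  by_cases hsmall : (x :: rest).count x - 2 < 2
  · rw [if_pos hsmall]
    rw [hcons x, if_pos rfl] at hsmall
    have hset : (rest.erase x).toFinset.filter (fun z => 2 ≤ (rest.erase x).count z)
        = ((x :: rest).toFinset.filter (fun z => 2 ≤ (x :: rest).count z)).erase x := by
      ext y
      rw [Finset.mem_erase, mem_dksFilter, mem_dksFilter, hcnt y, hcons y]
      split_ifs with hy
      · simp only [hy, ne_eq, not_true_eq_false, false_and, iff_false]
        omega
      · simp only [ne_eq, hy, not_false_eq_true, true_and]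
    unfold dks
    rw [hset, Finset.card_erase_of_mem hxS]
  · rw [if_neg hsmall]
    rw [hcons x, if_pos rfl] at hsmall
    have hset : (rest.erase x).toFinset.filter (fun z => 2 ≤ (rest.erase x).count z)
        = (x :: rest).toFinset.filter (fun z => 2 ≤ (x :: rest).count z) := by
      ext y
      rw [mem_dksFilter, mem_dksFilter, hcnt y, hcons y]
      split_ifs with hy
      · omega
      · exact Iff.rfl
    unfold dks
    rw [hset]

-- one-step unfoldings of A
theorem A_nodup (deck : List String) (h : deck.Nodup) : initial_putdown deck = deck := by
  rw [initial_putdown]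
  rw [dif_neg (not_ne_iff.mpr ((setLen_eq_iff_nodup deck).mpr h))]

theorem A_cons (x : String) (rest : List String)
    (h : (PySem.Set.ofList (x :: rest)).length ≠ (x :: rest).length) :
    initial_putdown (x :: rest) =
      if x ∈ rest then initial_putdown (rest.erase x) else initial_putdown (rest ++ [x]) := by
  rw [initial_putdown, dif_pos h]
  show (if hx : x ∈ rest then initial_putdown ((PySem.List.remove? rest x).getD rest)
      else initial_putdown (rest ++ [x])) = _
  split_ifs with hx
  · rw [PySem.List.remove?_eq_some_erase rest x hx, Option.getD_some]
  · rfl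

-- the simulation: Source B's loop state corresponds to A's remaining deck through rp
theorem sim (fuel : Nat) (dq : List String) (cnt : PySem.Dict String Int) (dk : Int)
    (pend : PySem.Dict String Int)
    (hnn : ∀ y, 0 ≤ pf pend y)
    (hcnt : ∀ y, cnt.getD y 0 = (List.count y (rp dq (pf pend)) : Int))
    (hdk : dk = (dks (rp dq (pf pend)) : Int))
    (hfuel : 2 * muA (rp dq (pf pend)) + (dq.length - (rp dq (pf pend)).length) < fuel) :
    bLoop fuel dq cnt dk pend = initial_putdown (rp dq (pf pend)) := by
  induction fuel generalizing dq cnt dk pend with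
  | zero => exact absurd hfuel (Nat.not_lt_zero _)
  | succ fuel ih =>
    by_cases hdk0 : dk = 0
    · have hz : dks (rp dq (pf pend)) = 0 := by
        rw [hdk0] at hdk; exact_mod_cast hdk.symm
      have hnd : (rp dq (pf pend)).Nodup := (dks_eq_zero_iff _).mp hz
      have hL : bLoop (fuel + 1) dq cnt dk pend = bFinal dq pend := by
        simp [bLoop, hdk0]
      rw [hL, bFinal_eq_rp, A_nodup _ hnd]
    · have hdks : dks (rp dq (pf pend)) ≠ 0 := by
        intro h0
        exact hdk0 (by rw [hdk, h0]; rfl)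
      have hnd : ¬ (rp dq (pf pend)).Nodup := fun h => hdks ((dks_eq_zero_iff _).mpr h)
      cases dq with
      | nil => exact (hnd List.nodup_nil).elim
      | cons c dq' =>
        by_cases hp : pend.getD c 0 ≠ 0
        · -- lazy-deleted occurrence: skip it
          have hL : bLoop (fuel + 1) (c :: dq') cnt dk pend
              = bLoop fuel dq' cnt dk (pend.modify c 0 (· - 1)) := by
            simp [bLoop, hdk0, hp]
          have hpc : pf pend c ≠ 0 := hp
          have hrp : rp (c :: dq') (pf pend) = rp dq' (pf (pend.modify c 0 (· - 1))) := by
            rw [pf_modify_sub, rp_skip c dq' (pf pend) hpc]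
          have hnn' : ∀ y, 0 ≤ pf (pend.modify c 0 (· - 1)) y := by
            rw [pf_modify_sub]
            exact dec1_nonneg (pf pend) c hnn hpc
          have hlen : (rp dq' (pf (pend.modify c 0 (· - 1)))).length ≤ dq'.length :=
            rp_length_le _ _
          rw [hrp] at hcnt hdk hfuel
          rw [hL, hrp]
          refine ih dq' cnt dk _ hnn' hcnt hdk ?_
          simp only [List.length_cons] at hfuel
          omega
        · rw [ne_eq, not_not] at hp
          have hdeck : rp (c :: dq') (pf pend) = c :: rp dq' (pf pend) :=
            rp_keep c dq' (pf pend) hp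
          rw [hdeck] at hcnt hdk hfuel hnd
          have hset : (PySem.Set.ofList (c :: rp dq' (pf pend))).length
              ≠ (c :: rp dq' (pf pend)).length :=
            fun he => hnd ((setLen_eq_iff_nodup _).mp he)
          have hcc : (c :: rp dq' (pf pend)).count c = (rp dq' (pf pend)).count c + 1 := by
            simp [List.count_cons_self]
          by_cases h2 : 2 ≤ cnt.getD c 0
          · -- a pair is discarded
            have hcm : c ∈ rp dq' (pf pend) := by
              rw [hcnt c] at h2
              apply List.count_pos_iff.mp
              have := hcc
              omega
            have hL : bLoop (fuel + 1) (c :: dq') cnt dk pend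
                = bLoop fuel dq' (cnt.modify c 0 (· - 2))
                    (if (cnt.modify c 0 (· - 2)).getD c 0 < 2 then dk - 1 else dk)
                    (pend.modify c 0 (· + 1)) := by
              simp [bLoop, hdk0, hp, h2]
            have hrp' : rp dq' (pf (pend.modify c 0 (· + 1)))
                = (rp dq' (pf pend)).erase c := by
              rw [pf_modify_add]
              exact rp_bump dq' (pf pend) c hnn hcm
            have hnn' : ∀ y, 0 ≤ pf (pend.modify c 0 (· + 1)) y := by
              rw [pf_modify_add]
              intro y
              by_cases hy : y = c
              · subst hy; rw [bump_apply_self]; have := hnn y; omega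
              · rw [bump_apply_of_ne _ _ _ hy]; exact hnn y
            have hcnt' : ∀ y, (cnt.modify c 0 (· - 2)).getD y 0
                = (List.count y (rp dq' (pf (pend.modify c 0 (· + 1)))) : Int) := by
              intro y
              rw [hrp', PySem.Dict.getD_modify]
              by_cases hy : y = c
              · subst hy
                rw [if_pos rfl, hcnt y, hcc, List.count_erase_self]
                have h1 : 1 ≤ (rp dq' (pf pend)).count y := List.count_pos_iff.mpr hcm
                push_cast
                omega
              · rw [if_neg hy, hcnt y, List.count_erase_of_ne hy]
                congr 1
                simp [List.count_cons, Ne.symm hy]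
            have hdkr := dks_remove c (rp dq' (pf pend)) hcm
            have hcmod : (cnt.modify c 0 (· - 2)).getD c 0
                = (List.count c (c :: rp dq' (pf pend)) : Int) - 2 := by
              rw [PySem.Dict.getD_modify, if_pos rfl, hcnt c]
            have hdk' : (if (cnt.modify c 0 (· - 2)).getD c 0 < 2 then dk - 1 else dk)
                = (dks (rp dq' (pf (pend.modify c 0 (· + 1)))) : Int) := by
              rw [hrp', hdkr]
              have hd1 : 1 ≤ dks (c :: rp dq' (pf pend)) := by omega
              by_cases hs : (List.count c (c :: rp dq' (pf pend)) : Int) - 2 < 2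
              · rw [if_pos (by rw [hcmod]; exact hs), if_pos (by omega), hdk]
                push_cast
                omega
              · rw [if_neg (by rw [hcmod]; exact hs), if_neg (by omega), hdk]
            have hmu : muA ((rp dq' (pf pend)).erase c) < muA (c :: rp dq' (pf pend)) :=
              firstDup_remove_lt c (rp dq' (pf pend)) hcm
            have hlen1 : ((rp dq' (pf pend)).erase c).length = (rp dq' (pf pend)).length - 1 :=
              List.length_erase_of_mem hcm
            have hlen2 : (rp dq' (pf pend)).length ≤ dq'.length := rp_length_le _ _
            have hfuel' : 2 * muA (rp dq' (pf (pend.modify c 0 (· + 1))))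
                + (dq'.length - (rp dq' (pf (pend.modify c 0 (· + 1)))).length) < fuel := by
              rw [hrp']
              simp only [List.length_cons] at hfuel
              omega
            rw [hL, hdeck, A_cons c _ hset, if_pos hcm,
              ih dq' _ _ _ hnn' hcnt' hdk' hfuel', hrp']
          · -- the front card has no partner: rotate it to the back
            have hc1 : (rp dq' (pf pend)).count c = 0 := by
              have := hcnt c
              rw [hcc] at this
              have h2' : cnt.getD c 0 < 2 := by omega
              rw [this] at h2'
              push_cast at h2'
              omega
            have hcm : c ∉ rp dq' (pf pend) := List.count_eq_zero.mp hc1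
            have hL : bLoop (fuel + 1) (c :: dq') cnt dk pend
                = bLoop fuel (dq' ++ [c]) cnt dk pend := by
              simp [bLoop, hdk0, hp, h2]
            have hrp2 : rp (dq' ++ [c]) (pf pend) = rp dq' (pf pend) ++ [c] :=
              rp_append dq' (pf pend) c hp
            have hpm : (rp dq' (pf pend) ++ [c]).Perm (c :: rp dq' (pf pend)) :=
              List.perm_append_singleton c _
            have hcnt' : ∀ y, cnt.getD y 0 = (List.count y (rp (dq' ++ [c]) (pf pend)) : Int) := by
              intro y
              rw [hrp2, hpm.count_eq y, hcnt y]
            have hdk' : dk = (dks (rp (dq' ++ [c]) (pf pend)) : Int) := by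
              rw [hrp2, dks_perm _ _ hpm, hdk]
            have hmu : muA (rp dq' (pf pend) ++ [c]) < muA (c :: rp dq' (pf pend)) :=
              firstDup_rotate_lt c (rp dq' (pf pend)) hcm hset
            have hfuel' : 2 * muA (rp (dq' ++ [c]) (pf pend))
                + ((dq' ++ [c]).length - (rp (dq' ++ [c]) (pf pend)).length) < fuel := by
              rw [hrp2]
              have hlen2 : (rp dq' (pf pend)).length ≤ dq'.length := rp_length_le _ _
              simp only [List.length_cons, List.length_append, List.length_singleton] at hfuel ⊢
              omega
            rw [hL, hdeck, A_cons c _ hset, if_neg hcm,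
              ih (dq' ++ [c]) cnt dk pend hnn hcnt' hdk' hfuel', hrp2]

-- the initial value of dup_kinds counts exactly the duplicated kinds
theorem dk_init (deck : List String) :
    (((PySem.Dict.counter deck).values.filter (fun v => decide (2 ≤ v))).length)
      = dks deck := by
  have hv : (PySem.Dict.counter deck).values
      = (PySem.Set.ofList deck).map (fun k => (List.count k deck : Int)) := by
    show ((PySem.Dict.counter deck).items.map (·.2)) = _
    rw [PySem.Dict.items_counter, List.map_map]
    rfl
  rw [hv, List.filter_map, List.length_map]
  have hpred : ((PySem.Set.ofList deck).filter
        ((fun v => decide (2 ≤ v)) ∘ fun k => (List.count k deck : Int)))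
      = (PySem.Set.ofList deck).filter (fun k => decide (2 ≤ List.count k deck)) := by
    apply List.filter_congr
    intro k _
    simp only [Function.comp_apply, decide_eq_decide]
    omega
  rw [hpred]
  have hnd : ((PySem.Set.ofList deck).filter (fun k => decide (2 ≤ List.count k deck))).Nodup :=
    (PySem.Set.nodup_ofList deck).filter _
  rw [← List.toFinset_card_of_nodup hnd, List.toFinset_filter]
  unfold dks
  congr 1
  ext y
  simp [List.mem_toFinset, PySem.Set.mem_ofList]

-- ===== VERDICT (by name: the statement is the Claim_ definition above) =====
theorem initial_putdown_spec : Claim_equal_initial_putdown := by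
  intro deck _
  show initial_putdown deck = initial_putdown_alt deck
  have hpf0 : pf (PySem.Dict.empty : PySem.Dict String Int) = fun _ => 0 := by
    funext y
    simp [pf, PySem.Dict.getD_empty]
  have hrp0 : rp deck (pf (PySem.Dict.empty : PySem.Dict String Int)) = deck := by
    rw [hpf0]
    exact rp_zero deck _ (fun _ => rfl)
  have hnn : ∀ y, 0 ≤ pf (PySem.Dict.empty : PySem.Dict String Int) y := by
    intro y
    rw [hpf0]
  have hcnt : ∀ y, (PySem.Dict.counter deck).getD y 0
      = (List.count y (rp deck (pf (PySem.Dict.empty : PySem.Dict String Int))) : Int) := by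
    intro y
    rw [hrp0, PySem.Dict.getD_counter]
  have hdk : ((((PySem.Dict.counter deck).values.filter (fun v => decide (2 ≤ v))).length : Nat) : Int)
      = (dks (rp deck (pf (PySem.Dict.empty : PySem.Dict String Int))) : Int) := by
    rw [hrp0, dk_init]
  have hfd : firstDup deck ≤ deck.length := List.findIdx_le_length
  have hfuel : 2 * muA (rp deck (pf (PySem.Dict.empty : PySem.Dict String Int)))
      + (deck.length - (rp deck (pf (PySem.Dict.empty : PySem.Dict String Int))).length)
      < 2 * deck.length * deck.length + 2 * deck.length + 1 := by
    rw [hrp0]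
    unfold muA
    have : 2 * deck.length * deck.length = 2 * (deck.length * deck.length) := by ring
    rw [this]
    omega
  have := sim (2 * deck.length * deck.length + 2 * deck.length + 1) deck
    (PySem.Dict.counter deck)
    ((((PySem.Dict.counter deck).values.filter (fun v => decide (2 ≤ v))).length : Nat) : Int)
    PySem.Dict.empty hnn hcnt hdk hfuel
  rw [hrp0] at this
  exact this.symm
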